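-- pv_equiv track=rewrite | github.com/fkrdnjs/kdata_fashion | hello.py | top_n_indices
-- ===== SOURCE A (Python) =====
-- import heapq
--
-- def top_n_indices(arr, n):
--     top_indices = []
--
--     heap = [(-value, index) for index, value in enumerate(arr)]
--     heapq.heapify(heap)
--
--     for _ in range(n):
--         neg_value, index = heapq.heappop(heap)
--         top_indices.append(index)
--
--     return top_indices
-- ===== SOURCE B (Python) =====
-- def top_n_indices(arr, n):
--     # full sort of (-value, index) pairs instead of a heap; index-bounded reads
--     pairs = sorted((-value, index) for index, value in enumerate(arr))
--     top_indices = []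
--     for i in range(n):
--         top_indices.append(pairs[i][1])
--     return top_indices
-- ===== Notes on version B (the rewrite author's own statement) =====
-- stated objective: simpler
-- what changed: Replaces heap construction and n heappop extractions with one full sort of the (-value, index) pairs followed by an index-bounded read of the first n indices.
import Mathlib
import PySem

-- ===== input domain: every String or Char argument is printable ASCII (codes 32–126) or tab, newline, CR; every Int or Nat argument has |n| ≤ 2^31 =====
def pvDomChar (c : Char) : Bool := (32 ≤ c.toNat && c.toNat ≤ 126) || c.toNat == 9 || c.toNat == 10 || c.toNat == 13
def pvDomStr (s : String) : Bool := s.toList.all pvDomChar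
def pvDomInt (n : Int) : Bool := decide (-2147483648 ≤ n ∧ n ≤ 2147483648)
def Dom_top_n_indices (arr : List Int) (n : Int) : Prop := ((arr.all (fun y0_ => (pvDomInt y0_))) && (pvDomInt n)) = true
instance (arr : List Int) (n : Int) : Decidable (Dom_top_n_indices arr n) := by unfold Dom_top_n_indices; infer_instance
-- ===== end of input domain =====

-- B replaces the heap-based n-pop selection with one full sort of the (-value, index)
-- pairs followed by an index-bounded read of the first n indices (objective: simpler).


-- ===== PORT A =====
-- 'for _ in range(n): heappop(heap)': heapq.heappop returns the least element of the heap
-- under Python's lexicographic tuple order; the pairs (-value, index) have pairwise distinct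
-- indices, so that least element is unique and popping it is exactly "remove the first
-- minimum" — ported as min2? (lexicographic first minimum) + erase.  heappop of an empty
-- heap raises IndexError in Python; the 'none' branch is excluded by Pre_.
def pvHeapPops : Nat → List (Int × Int) → List Int → List Int
  | 0, _, acc => acc
  | k+1, heap, acc =>
    match PySem.List.min2? heap Prod.fst Prod.snd with
    | none => acc
    | some m => pvHeapPops k (heap.erase m) (acc ++ [m.2])

def top_n_indices (arr : List Int) (n : Int) : List Int :=
  let heap := (PySem.List.enumerate arr).map (fun p => (-p.2, p.1))
  pvHeapPops n.toNat heap []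

-- ===== PORT B =====
-- pairs[i] raises IndexError in Python when i ≥ len(pairs); the 'none' branch is excluded by Pre_.
def top_n_indices_alt (arr : List Int) (n : Int) : List Int :=
  let pairs := PySem.List.sorted2 ((PySem.List.enumerate arr).map (fun p => (-p.2, p.1))) Prod.fst Prod.snd
  (PySem.List.pyRange 0 n 1).foldl (fun acc i =>
    match PySem.List.pyGet? pairs i with
    | some p => acc ++ [p.2]
    | none => acc) []

-- ===== PRECONDITION & SPEC =====
-- Pre_ excludes exactly the inputs with n > len(arr), on which A raises IndexError
-- (heappop of an exhausted heap); B raises IndexError there too (pairs[i] out of range).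
def Pre_top_n_indices (arr : List Int) (n : Int) : Prop := n ≤ (arr.length : Int)
instance (arr : List Int) (n : Int) : Decidable (Pre_top_n_indices arr n) := by unfold Pre_top_n_indices; infer_instance

def pvWitness_top_n_indices : List Int × Int := ([3, 1, 3, -2], 2)

def Spec_top_n_indices (arr : List Int) (n : Int) (out : List Int) : Prop := out = top_n_indices_alt arr n
instance (arr : List Int) (n : Int) (out : List Int) : Decidable (Spec_top_n_indices arr n out) := by unfold Spec_top_n_indices; infer_instance

-- ===== CLAIM (what is proved, stated in full; the proofs are below) =====
def Claim_equal_top_n_indices : Prop := ∀ (arr : List Int) (n : Int), Dom_top_n_indices arr n → Pre_top_n_indices arr n → Spec_top_n_indices arr n (top_n_indices arr n)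

-- ===== LEMMAS AND PROOFS =====

-- the lexicographic tuple comparison used by min2?/sorted2 is '<' of the Lex order
theorem pvLexBridge (a b : Int × Int) :
    (decide (a.1 < b.1) || !decide (b.1 < a.1) && decide (a.2 < b.2)) = decide (toLex a < toLex b) := by
  rw [Bool.eq_iff_iff]
  simp [Prod.Lex.lt_iff]
  omega

theorem pvMin2_eq_min (xs : List (Int × Int)) :
    PySem.List.min2? xs Prod.fst Prod.snd = PySem.List.min? xs (fun p => toLex p) := by
  simp only [PySem.List.min2?, PySem.List.min?]
  congr 1
  funext acc x
  cases acc with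
  | none => rfl
  | some m => simp only [pvLexBridge x m, decide_eq_true_eq]

theorem pvSorted2_eq_sorted (xs : List (Int × Int)) :
    PySem.List.sorted2 xs Prod.fst Prod.snd = PySem.List.sorted xs (fun p => toLex p) := by
  simp only [PySem.List.sorted2, PySem.List.sorted, if_neg Bool.false_ne_true]
  congr 1
  funext acc x
  congr 1
  funext a b
  rw [pvLexBridge]

theorem pvSorted_cons_min {l : List (Int × Int)} {m : Int × Int}
    (hm : PySem.List.min? l (fun p => toLex p) = some m) :
    PySem.List.sorted l (fun p => toLex p) = m :: PySem.List.sorted (l.erase m) (fun p => toLex p) := by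
  have hmem : m ∈ l := PySem.List.min?_mem hm
  have hmin : ∀ y ∈ l, toLex m ≤ toLex y := PySem.List.min?_isMin hm
  have hperm : (PySem.List.sorted l (fun p => toLex p)).Perm l := PySem.List.sorted_perm l _ false
  have hpw := PySem.List.sorted_pairwise l (fun p => toLex p)
  cases hS : PySem.List.sorted l (fun p => toLex p) with
  | nil =>
      rw [hS] at hperm
      have : l = [] := hperm.symm.eq_nil
      simp [this] at hmem
  | cons h t =>
      rw [hS] at hperm hpw
      have hhl : h ∈ l := hperm.mem_iff.mp (List.mem_cons_self)
      have hhm : h = m := by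
        have h1 : toLex m ≤ toLex h := hmin h hhl
        have hmS : m ∈ h :: t := hperm.mem_iff.mpr hmem
        rcases List.mem_cons.mp hmS with he | ht
        · exact he.symm
        · have h2 : toLex h ≤ toLex m := (List.pairwise_cons.mp hpw).1 m ht
          exact toLex.injective (le_antisymm h2 h1)
      subst hhm
      congr 1
      apply PySem.List.eq_of_perm_of_pairwise_le_of_injective (fun p : Int × Int => toLex p) toLex.injective
      · have p1 : (PySem.List.sorted (l.erase h) (fun p => toLex p)).Perm (l.erase h) :=
          PySem.List.sorted_perm _ _ false
        have p2 : (l.erase h).Perm ((h :: t).erase h) := (hperm.symm.erase h)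
        simp at p2
        exact p2.symm.trans p1.symm
      · exact (List.pairwise_cons.mp hpw).2
      · exact PySem.List.sorted_pairwise _ _

theorem pvHeapPops_eq (k : Nat) (l : List (Int × Int)) (acc : List Int)
    (hnd : l.Nodup) (hk : k ≤ l.length) :
    pvHeapPops k l acc = acc ++ ((PySem.List.sorted l (fun p => toLex p)).take k).map Prod.snd := by
  induction k generalizing l acc with
  | zero => simp [pvHeapPops]
  | succ k ih =>
      have hne : l ≠ [] := by intro h; subst h; simp at hk
      cases hmin : PySem.List.min? l (fun p => toLex p) with
      | none => exact absurd ((PySem.List.min?_eq_none_iff _ _).mp hmin) hne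
      | some m =>
          have hmem : m ∈ l := PySem.List.min?_mem hmin
          rw [pvHeapPops, pvMin2_eq_min, hmin]
          dsimp only
          rw [ih (l.erase m) _ (hnd.erase m)
              (by rw [List.length_erase_of_mem hmem]; omega)]
          rw [pvSorted_cons_min hmin]
          simp

theorem pvBLoop_eq (m : Nat) (pairs : List (Int × Int)) (acc : List Int) (hm : m ≤ pairs.length) :
    List.foldl (fun acc i =>
      match PySem.List.pyGet? pairs i with
      | some p => acc ++ [p.2]
      | none => acc) acc (List.map (fun k : Nat => (k : Int)) (List.range m)) = acc ++ (pairs.take m).map Prod.snd := by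
  induction m generalizing acc with
  | zero => simp
  | succ k ih =>
      have hk : k < pairs.length := by omega
      simp only [List.range_succ, List.map_append, List.map_cons, List.map_nil,
        List.foldl_append, List.foldl_cons]
      rw [ih acc (by omega), PySem.List.pyGet?_natCast, List.getElem?_eq_getElem hk]
      dsimp only
      rw [List.take_add_one, List.map_append]
      simp [List.getElem?_eq_getElem hk]

theorem pvEnumLenGen (arr : List Int) : ∀ s : Int, (PySem.List.enumerate arr s).length = arr.length := by
  induction arr with
  | nil => intro s; rfl
  | cons x t ih => intro s; simp [PySem.List.enumerate, ih]

theorem pvEnumFstGe (arr : List Int) : ∀ s : Int, ∀ p ∈ PySem.List.enumerate arr s, s ≤ p.1 := by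
  induction arr with
  | nil => intro s p hp; simp [PySem.List.enumerate] at hp
  | cons x t ih =>
      intro s p hp
      simp only [PySem.List.enumerate, List.mem_cons] at hp
      rcases hp with h | h
      · simp [h]
      · have := ih (s+1) p h; omega

theorem pvEnumNodupGen (arr : List Int) : ∀ s : Int, (PySem.List.enumerate arr s).Nodup := by
  induction arr with
  | nil => intro s; simp [PySem.List.enumerate]
  | cons x t ih =>
      intro s
      simp only [PySem.List.enumerate, List.nodup_cons]
      refine ⟨fun h => ?_, ih (s+1)⟩
      have := pvEnumFstGe t (s+1) _ h
      simp at this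

theorem pvEnumNodup (arr : List Int) :
    (((PySem.List.enumerate arr).map (fun p => (-p.2, p.1))) : List (Int × Int)).Nodup := by
  refine List.Nodup.map ?_ (pvEnumNodupGen arr 0)
  intro a b hab
  have h1 : -a.2 = -b.2 := congrArg Prod.fst hab
  have h2 : a.1 = b.1 := congrArg Prod.snd hab
  exact Prod.ext h2 (by omega)

theorem pvEnumLen (arr : List Int) : (PySem.List.enumerate arr).length = arr.length :=
  pvEnumLenGen arr 0


-- ===== VERDICT (by name: the statement is the Claim_ definition above) =====
theorem top_n_indices_spec : Claim_equal_top_n_indices := by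
  intro arr n _ hpre
  unfold Spec_top_n_indices top_n_indices top_n_indices_alt
  have hpre' : n ≤ (arr.length : Int) := hpre
  set heap : List (Int × Int) := (PySem.List.enumerate arr).map (fun p => (-p.2, p.1)) with hheap
  have hlen : heap.length = arr.length := by
    rw [hheap, List.length_map, pvEnumLen]
  have hnt : n.toNat ≤ heap.length := by omega
  rw [pvHeapPops_eq n.toNat heap [] (pvEnumNodup arr) hnt, pvSorted2_eq_sorted]
  have hslen : (PySem.List.sorted heap (fun p => toLex p)).length = heap.length :=
    (PySem.List.sorted_perm heap _ false).length_eq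
  by_cases hn : 0 < n
  · have : n = ((n.toNat : Nat) : Int) := by omega
    rw [this, PySem.List.pyRange_zero_natCast]
    dsimp only
    rw [pvBLoop_eq n.toNat _ [] (by omega)]
    simp
    omega
  · have h1 : PySem.List.pyRange 0 n 1 = [] := by simp [PySem.List.pyRange, hn]
    have h2 : n.toNat = 0 := by omega
    simp [h1, h2]
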